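-- pv_equiv track=rewrite | github.com/trer/AlgDAT | Sheet_cutting.py | sheet_cutting
-- ===== SOURCE A (Python) =====
-- def sheet_cutting(w, h, p):
--     for i in range(1, w+1):
--         for j in range(1, h+1):
--             if i == j == 1:
--                 pass
--             else:
--                 for k in range(1, i//2 + 1):
--                     p[i, j] = max(p[i, j], p[k, j] + p[i-k, j])
--                 for l in range(1, j//2 + 1):
--                     p[i, j] = max(p[i, j], p[i, l] + p[i, j-l])
--     return p[w, h]
-- ===== SOURCE B (Python) =====
-- # Top-down memoization of the same cutting recurrence (A fills the table row-major
-- # and mutates p in place; B recurses from (w, h) with a separate memo and leaves p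
-- # untouched -- the equivalence is about the return value only).
-- def sheet_cutting(w, h, p):
--     if w < 1 or h < 1:
--         # degenerate sheet: no cut fits, its value is its listed price
--         return p[w, h]
--     memo = {}
--
--     def best(i, j):
--         if (i, j) in memo:
--             return memo[i, j]
--         val = p[i, j]
--         for k in range(1, i // 2 + 1):
--             val = max(val, best(k, j) + best(i - k, j))
--         for l in range(1, j // 2 + 1):
--             val = max(val, best(i, l) + best(i, j - l))
--         memo[i, j] = val
--         return val
--
--     return best(w, h)
-- ===== Notes on version B (the rewrite author's own statement) =====
-- stated objective: alternative
-- what changed: Replaces the bottom-up row-major in-place table fill by top-down memoized recursion from (w,h) over the same recurrence (degenerate sheets keep their listed price, as in A), using a separate memo dict and leaving p unmutated.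
import Mathlib
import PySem

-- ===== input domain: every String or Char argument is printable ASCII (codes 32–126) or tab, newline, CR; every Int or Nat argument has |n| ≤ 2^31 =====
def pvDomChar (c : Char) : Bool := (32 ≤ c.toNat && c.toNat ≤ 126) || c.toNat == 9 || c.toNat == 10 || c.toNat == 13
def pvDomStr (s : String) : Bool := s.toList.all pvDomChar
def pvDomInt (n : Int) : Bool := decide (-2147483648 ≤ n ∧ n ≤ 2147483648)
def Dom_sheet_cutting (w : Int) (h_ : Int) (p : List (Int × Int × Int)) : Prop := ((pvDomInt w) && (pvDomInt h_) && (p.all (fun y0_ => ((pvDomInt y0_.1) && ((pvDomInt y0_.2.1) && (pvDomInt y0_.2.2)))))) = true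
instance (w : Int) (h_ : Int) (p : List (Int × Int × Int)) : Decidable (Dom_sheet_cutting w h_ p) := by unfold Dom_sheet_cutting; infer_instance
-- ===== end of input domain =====

-- B replaces A's bottom-up row-major in-place table fill by top-down memoized recursion
-- over the same recurrence (A mutates p in place, B does not: the equivalence proved
-- here is about the return value only).


-- the Python dict argument, as a PySem.Dict keyed by the (i, j) pair
def pvDictP (p : List (Int × Int × Int)) : PySem.Dict (Int × Int) Int :=
  PySem.Dict.ofList (p.map (fun t => ((t.1, t.2.1), t.2.2)))

-- ===== PORT A =====
def sheet_cutting (w : Int) (h_ : Int) (p : List (Int × Int × Int)) : Int :=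
  let d0 := pvDictP p
  let dF := (PySem.List.pyRange 1 (w + 1) 1).foldl (fun d i =>
    (PySem.List.pyRange 1 (h_ + 1) 1).foldl (fun d j =>
      if i = 1 ∧ j = 1 then d
      else
        let d1 := (PySem.List.pyRange 1 (PySem.Int.floordiv i 2 + 1) 1).foldl
          (fun d k => d.insert (i, j)
            (max (d.getD (i, j) 0) (d.getD (k, j) 0 + d.getD (i - k, j) 0))) d
        (PySem.List.pyRange 1 (PySem.Int.floordiv j 2 + 1) 1).foldl
          (fun d l => d.insert (i, j)
            (max (d.getD (i, j) 0) (d.getD (i, l) 0 + d.getD (i, j - l) 0))) d1) d) d0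
  dF.getD (w, h_) 0

-- ===== PORT B =====
-- best(i, j) of Source B, with the memo threaded through and a fuel guard making the
-- recursion total (the fuel supplied below is proved sufficient on Pre_).
def pvBest (p0 : PySem.Dict (Int × Int) Int) :
    Nat → Int → Int → PySem.Dict (Int × Int) Int → Int × PySem.Dict (Int × Int) Int
  | 0, i, j, memo => (p0.getD (i, j) 0, memo)
  | f + 1, i, j, memo =>
    match memo.get? (i, j) with
    | some v => (v, memo)
    | none =>
      let s1 := (PySem.List.pyRange 1 (PySem.Int.floordiv i 2 + 1) 1).foldl
        (fun (s : Int × PySem.Dict (Int × Int) Int) k =>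
          let r1 := pvBest p0 f k j s.2
          let r2 := pvBest p0 f (i - k) j r1.2
          (max s.1 (r1.1 + r2.1), r2.2)) (p0.getD (i, j) 0, memo)
      let s2 := (PySem.List.pyRange 1 (PySem.Int.floordiv j 2 + 1) 1).foldl
        (fun (s : Int × PySem.Dict (Int × Int) Int) l =>
          let r1 := pvBest p0 f i l s.2
          let r2 := pvBest p0 f i (j - l) r1.2
          (max s.1 (r1.1 + r2.1), r2.2)) s1
      (s2.1, s2.2.insert (i, j) s2.1)

def sheet_cutting_alt (w : Int) (h_ : Int) (p : List (Int × Int × Int)) : Int :=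
  if w < 1 ∨ h_ < 1 then (pvDictP p).getD (w, h_) 0
  else (pvBest (pvDictP p) ((w + h_).toNat + 1) w h_ PySem.Dict.empty).1

-- ===== PRECONDITION & SPEC =====
-- Pre_ is exactly where the Python A returns normally: for positive dimensions every
-- grid key (i,j), 1 ≤ i ≤ w, 1 ≤ j ≤ h, is present (A reads them all), and for a
-- degenerate sheet the key (w,h) is present; everywhere else A raises KeyError.
def Pre_sheet_cutting (w : Int) (h_ : Int) (p : List (Int × Int × Int)) : Prop :=
  (1 ≤ w ∧ 1 ≤ h_ ∧
    ∀ i ∈ PySem.List.pyRange 1 (w + 1) 1, ∀ j ∈ PySem.List.pyRange 1 (h_ + 1) 1,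
      (i, j) ∈ p.map (fun t => (t.1, t.2.1))) ∨
  ((w < 1 ∨ h_ < 1) ∧ (w, h_) ∈ p.map (fun t => (t.1, t.2.1)))
instance (w : Int) (h_ : Int) (p : List (Int × Int × Int)) : Decidable (Pre_sheet_cutting w h_ p) := by unfold Pre_sheet_cutting; infer_instance

def pvWitness_sheet_cutting : Int × Int × (List (Int × Int × Int)) :=
  (2, 1, [(1, 1, 3), (2, 1, 7)])

def Spec_sheet_cutting (w : Int) (h_ : Int) (p : List (Int × Int × Int)) (out : Int) : Prop := out = sheet_cutting_alt w h_ p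
instance (w : Int) (h_ : Int) (p : List (Int × Int × Int)) (out : Int) : Decidable (Spec_sheet_cutting w h_ p out) := by unfold Spec_sheet_cutting; infer_instance

-- ===== CLAIM (what is proved, stated in full; the proofs are below) =====
def Claim_equal_sheet_cutting : Prop := ∀ (w : Int) (h_ : Int) (p : List (Int × Int × Int)), Dom_sheet_cutting w h_ p → Pre_sheet_cutting w h_ p → Spec_sheet_cutting w h_ p (sheet_cutting w h_ p)

-- ===== LEMMAS AND PROOFS =====

-- the common functional spec: the optimal value of an i×j sheet, with fuel
def pvV (d0 : PySem.Dict (Int × Int) Int) : Nat → Int → Int → Int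
  | 0, i, j => d0.getD (i, j) 0
  | f + 1, i, j =>
    let v1 := (PySem.List.pyRange 1 (PySem.Int.floordiv i 2 + 1) 1).foldl
      (fun v k => max v (pvV d0 f k j + pvV d0 f (i - k) j)) (d0.getD (i, j) 0)
    (PySem.List.pyRange 1 (PySem.Int.floordiv j 2 + 1) 1).foldl
      (fun v l => max v (pvV d0 f i l + pvV d0 f i (j - l))) v1

-- fuel-free name: enough fuel for cell (i, j)
def pvVal (d0 : PySem.Dict (Int × Int) Int) (i j : Int) : Int := pvV d0 (i + j).toNat i j

lemma pvV_step (d0 : PySem.Dict (Int × Int) Int) :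
    ∀ f : Nat, ∀ i j : Int, 1 ≤ i → 1 ≤ j → i + j - 2 ≤ (f : Int) →
      pvV d0 (f + 1) i j = pvV d0 f i j := by
  intro f
  induction f with
  | zero =>
    intro i j hi hj hf
    have hij : i = 1 ∧ j = 1 := by omega
    obtain ⟨rfl, rfl⟩ := hij
    have h2 : PySem.Int.floordiv 1 2 = 0 := by decide
    simp [pvV, PySem.List.pyRange_one_eq_nil le_rfl]
  | succ f ih =>
    intro i j hi hj hf
    have hdi : PySem.Int.floordiv i 2 ≤ i - 1 := by
      rw [PySem.Int.floordiv_eq_ediv_of_pos (by omega)]; omega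
    have hdj : PySem.Int.floordiv j 2 ≤ j - 1 := by
      rw [PySem.Int.floordiv_eq_ediv_of_pos (by omega)]; omega
    show pvV d0 (f + 1 + 1) i j = pvV d0 (f + 1) i j
    conv_lhs => rw [pvV]
    conv_rhs => rw [pvV]
    have hk : (PySem.List.pyRange 1 (PySem.Int.floordiv i 2 + 1) 1).foldl
        (fun v k => max v (pvV d0 (f + 1) k j + pvV d0 (f + 1) (i - k) j)) (d0.getD (i, j) 0)
        = (PySem.List.pyRange 1 (PySem.Int.floordiv i 2 + 1) 1).foldl
        (fun v k => max v (pvV d0 f k j + pvV d0 f (i - k) j)) (d0.getD (i, j) 0) := by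
      apply PySem.List.foldl_congr_mem
      intro acc k hk
      rw [PySem.List.mem_pyRange_one] at hk
      rw [ih k j (by omega) hj (by omega), ih (i - k) j (by omega) hj (by omega)]
    rw [hk]
    apply PySem.List.foldl_congr_mem
    intro acc l hl
    rw [PySem.List.mem_pyRange_one] at hl
    rw [ih i l hi (by omega) (by omega), ih i (j - l) hi (by omega) (by omega)]

lemma pvV_eq_min (d0 : PySem.Dict (Int × Int) Int) (i j : Int)
    (hi : 1 ≤ i) (hj : 1 ≤ j) :
    ∀ f : Nat, i + j - 2 ≤ (f : Int) → pvV d0 f i j = pvV d0 (i + j - 2).toNat i j := by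
  intro f hf
  have hle : (i + j - 2).toNat ≤ f := by omega
  obtain ⟨n, rfl⟩ := Nat.exists_eq_add_of_le hle
  induction n with
  | zero => rfl
  | succ n ihn =>
    have he : (i + j - 2).toNat + (n + 1) = ((i + j - 2).toNat + n) + 1 := by omega
    rw [he, pvV_step d0 ((i + j - 2).toNat + n) i j hi hj (by omega)]
    exact ihn (by omega) (by omega)

lemma pvV_eq (d0 : PySem.Dict (Int × Int) Int) (f : Nat) (i j : Int)
    (hi : 1 ≤ i) (hj : 1 ≤ j) (hf : i + j - 2 ≤ (f : Int)) :
    pvV d0 f i j = pvVal d0 i j := by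
  unfold pvVal
  rw [pvV_eq_min d0 i j hi hj f hf, pvV_eq_min d0 i j hi hj (i + j).toNat (by omega)]

lemma pvVal_rec (d0 : PySem.Dict (Int × Int) Int) (i j : Int) (hi : 1 ≤ i) (hj : 1 ≤ j) :
    pvVal d0 i j =
      (PySem.List.pyRange 1 (PySem.Int.floordiv j 2 + 1) 1).foldl
        (fun v l => max v (pvVal d0 i l + pvVal d0 i (j - l)))
        ((PySem.List.pyRange 1 (PySem.Int.floordiv i 2 + 1) 1).foldl
          (fun v k => max v (pvVal d0 k j + pvVal d0 (i - k) j)) (d0.getD (i, j) 0)) := by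
  have hdi : PySem.Int.floordiv i 2 ≤ i - 1 := by
    rw [PySem.Int.floordiv_eq_ediv_of_pos (by omega)]; omega
  have hdj : PySem.Int.floordiv j 2 ≤ j - 1 := by
    rw [PySem.Int.floordiv_eq_ediv_of_pos (by omega)]; omega
  have hpos : ∃ g : Nat, (i + j).toNat = g + 1 := ⟨(i + j).toNat - 1, by omega⟩
  obtain ⟨g, hg⟩ := hpos
  conv_lhs => rw [pvVal, hg, pvV]
  have hk : (PySem.List.pyRange 1 (PySem.Int.floordiv i 2 + 1) 1).foldl
      (fun v k => max v (pvV d0 g k j + pvV d0 g (i - k) j)) (d0.getD (i, j) 0)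
      = (PySem.List.pyRange 1 (PySem.Int.floordiv i 2 + 1) 1).foldl
      (fun v k => max v (pvVal d0 k j + pvVal d0 (i - k) j)) (d0.getD (i, j) 0) := by
    apply PySem.List.foldl_congr_mem
    intro acc k hk
    rw [PySem.List.mem_pyRange_one] at hk
    rw [pvV_eq d0 g k j (by omega) hj (by omega), pvV_eq d0 g (i - k) j (by omega) hj (by omega)]
  rw [hk]
  apply PySem.List.foldl_congr_mem
  intro acc l hl
  rw [PySem.List.mem_pyRange_one] at hl
  rw [pvV_eq d0 g i l hi (by omega) (by omega), pvV_eq d0 g i (j - l) hi (by omega) (by omega)]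

-- ---------- A side ----------

-- invariant: cells processed so far hold their final value, everything else original
def pvInv (w h_ : Int) (d0 d : PySem.Dict (Int × Int) Int) (i j : Int) : Prop :=
  ∀ a b : Int,
    d.getD (a, b) 0 =
      if 1 ≤ a ∧ a ≤ w ∧ 1 ≤ b ∧ b ≤ h_ ∧ (a < i ∨ (a = i ∧ b ≤ j)) then pvVal d0 a b
      else d0.getD (a, b) 0

-- a run of 'p[key] = max(p[key], read(p, k))' updates where every read avoids key
lemma pvFoldInsertMax (key : Int × Int) (L : List Int)
    (rd : PySem.Dict (Int × Int) Int → Int → Int) (r : Int → Int)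
    (d : PySem.Dict (Int × Int) Int)
    (hrd : ∀ d' k, k ∈ L → (∀ q : Int × Int, q ≠ key → d'.getD q 0 = d.getD q 0) →
      rd d' k = r k) :
    ∀ base : PySem.Dict (Int × Int) Int,
      (∀ q : Int × Int, q ≠ key → base.getD q 0 = d.getD q 0) →
      (∀ q : Int × Int, q ≠ key →
        (L.foldl (fun d k => d.insert key (max (d.getD key 0) (rd d k))) base).getD q 0
          = d.getD q 0) ∧
      (L.foldl (fun d k => d.insert key (max (d.getD key 0) (rd d k))) base).getD key 0
        = L.foldl (fun v k => max v (r k)) (base.getD key 0) := by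
  induction L with
  | nil => exact fun base hb => ⟨hb, rfl⟩
  | cons k L ihL =>
    intro base hb
    have hrk : rd base k = r k := hrd base k (List.mem_cons_self ..) hb
    have hb' : ∀ q : Int × Int, q ≠ key →
        (base.insert key (max (base.getD key 0) (rd base k))).getD q 0 = d.getD q 0 := by
      intro q hq
      rw [PySem.Dict.getD_insert, if_neg hq]
      exact hb q hq
    have := ihL (fun d' k hk ha => hrd d' k (List.mem_cons_of_mem _ hk) ha)
      (base.insert key (max (base.getD key 0) (rd base k))) hb'
    refine ⟨this.1, ?_⟩
    simp only [List.foldl_cons]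
    rw [this.2, PySem.Dict.getD_insert, if_pos rfl, hrk]

-- fold an indexed invariant along pyRange a b 1
lemma pvFoldInvAux {α : Type} (P : α → Int → Prop) (f : α → Int → α) (a b : Int)
    (step : ∀ x j, a ≤ j → j < b → P x (j - 1) → P (f x j) j) :
    ∀ n : Nat, a + n ≤ b → ∀ init : α, P init (a - 1) →
      P ((PySem.List.pyRange a (a + n) 1).foldl f init) (a + n - 1) := by
  intro n
  induction n with
  | zero =>
    intro _ init h
    rw [PySem.List.pyRange_one_eq_nil (show a + ((0:Nat):Int) ≤ a by push_cast; omega)]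
    simpa using h
  | succ n ihn =>
    intro hn init h
    have hsplit : PySem.List.pyRange a (a + (n + 1 : Nat)) 1
        = PySem.List.pyRange a (a + n) 1 ++ [a + n] := by
      have : (a + (n + 1 : Nat)) = (a + n) + 1 := by push_cast; ring
      rw [this, PySem.List.pyRange_one_succ_right (by omega)]
    rw [hsplit, List.foldl_append]
    have hprev := ihn (by omega) init h
    have := step _ (a + n) (by omega) (by omega) (by
      have he : (a + (n : Int)) - 1 = a + n - 1 := by ring
      simpa [he] using hprev)
    have he2 : a + ((n : Int) + 1) - 1 = a + n := by ring
    simp only [List.foldl_cons, List.foldl_nil]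
    rw [show ((a : Int) + ((n : Nat) + 1 : Nat)) - 1 = a + n by push_cast; ring]
    exact this

lemma pvFoldInv {α : Type} (P : α → Int → Prop) (f : α → Int → α) (a b : Int)
    (hab : a ≤ b)
    (step : ∀ x j, a ≤ j → j < b → P x (j - 1) → P (f x j) j) :
    ∀ init : α, P init (a - 1) → P ((PySem.List.pyRange a b 1).foldl f init) (b - 1) := by
  intro init h
  have hb : b = a + ((b - a).toNat : Int) := by omega
  rw [hb]
  exact pvFoldInvAux P f a b step (b - a).toNat (by omega) init h

lemma pvVal_one_one (d0 : PySem.Dict (Int × Int) Int) : pvVal d0 1 1 = d0.getD (1, 1) 0 := by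
  rw [pvVal_rec d0 1 1 le_rfl le_rfl]
  simp [PySem.List.pyRange_one_eq_nil le_rfl]

-- one cell of A's sweep preserves the invariant
lemma pvCell (w h_ : Int) (d0 : PySem.Dict (Int × Int) Int) (i j : Int)
    (hi1 : 1 ≤ i) (hiw : i ≤ w) (hj1 : 1 ≤ j) (hjh : j ≤ h_)
    (x : PySem.Dict (Int × Int) Int) (hx : pvInv w h_ d0 x i (j - 1)) :
    pvInv w h_ d0
      (if i = 1 ∧ j = 1 then x
       else
        (PySem.List.pyRange 1 (PySem.Int.floordiv j 2 + 1) 1).foldl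
          (fun d l => d.insert (i, j)
            (max (d.getD (i, j) 0) (d.getD (i, l) 0 + d.getD (i, j - l) 0)))
          ((PySem.List.pyRange 1 (PySem.Int.floordiv i 2 + 1) 1).foldl
            (fun d k => d.insert (i, j)
              (max (d.getD (i, j) 0) (d.getD (k, j) 0 + d.getD (i - k, j) 0))) x))
      i j := by
  have hdi : PySem.Int.floordiv i 2 ≤ i - 1 := by
    rw [PySem.Int.floordiv_eq_ediv_of_pos (by omega)]; omega
  have hdj : PySem.Int.floordiv j 2 ≤ j - 1 := by
    rw [PySem.Int.floordiv_eq_ediv_of_pos (by omega)]; omega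
  by_cases h11 : i = 1 ∧ j = 1
  · rw [if_pos h11]
    obtain ⟨rfl, rfl⟩ := h11
    intro a b
    have hxab := hx a b
    by_cases hab : a = 1 ∧ b = 1
    · obtain ⟨rfl, rfl⟩ := hab
      rw [if_pos ⟨le_rfl, hiw, le_rfl, hjh, Or.inr ⟨rfl, le_rfl⟩⟩]
      rw [if_neg (by omega)] at hxab
      rw [pvVal_one_one, hxab]
    · rw [hxab]
      have hiff : (1 ≤ a ∧ a ≤ w ∧ 1 ≤ b ∧ b ≤ h_ ∧ (a < 1 ∨ (a = 1 ∧ b ≤ 1 - 1))) ↔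
          (1 ≤ a ∧ a ≤ w ∧ 1 ≤ b ∧ b ≤ h_ ∧ (a < 1 ∨ (a = 1 ∧ b ≤ 1))) := by omega
      rw [if_congr hiff rfl rfl]
  · rw [if_neg h11]
    have hk := pvFoldInsertMax (i, j) (PySem.List.pyRange 1 (PySem.Int.floordiv i 2 + 1) 1)
      (fun d k => d.getD (k, j) 0 + d.getD (i - k, j) 0)
      (fun k => pvVal d0 k j + pvVal d0 (i - k) j) x
      (by
        intro d' k hkmem hagr
        rw [PySem.List.mem_pyRange_one] at hkmem
        have e1 := hagr (k, j) (by simp [Prod.ext_iff]; omega)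
        have e2 := hagr (i - k, j) (by simp [Prod.ext_iff]; omega)
        have v1 := hx k j
        rw [if_pos ⟨by omega, by omega, hj1, hjh, Or.inl (by omega)⟩] at v1
        have v2 := hx (i - k) j
        rw [if_pos ⟨by omega, by omega, hj1, hjh, Or.inl (by omega)⟩] at v2
        simp only []
        rw [e1, e2, v1, v2])
      x (fun _ _ => rfl)
    obtain ⟨hkoff, hkkey⟩ := hk
    have hbase : x.getD (i, j) 0 = d0.getD (i, j) 0 := by
      have := hx i j
      rw [if_neg (by omega)] at this
      exact this
    have hl := pvFoldInsertMax (i, j) (PySem.List.pyRange 1 (PySem.Int.floordiv j 2 + 1) 1)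
      (fun d l => d.getD (i, l) 0 + d.getD (i, j - l) 0)
      (fun l => pvVal d0 i l + pvVal d0 i (j - l)) x
      (by
        intro d' l hlmem hagr
        rw [PySem.List.mem_pyRange_one] at hlmem
        have e1 := hagr (i, l) (by simp [Prod.ext_iff]; omega)
        have e2 := hagr (i, j - l) (by simp [Prod.ext_iff]; omega)
        have v1 := hx i l
        rw [if_pos ⟨hi1, hiw, by omega, by omega, Or.inr ⟨rfl, by omega⟩⟩] at v1
        have v2 := hx i (j - l)
        rw [if_pos ⟨hi1, hiw, by omega, by omega, Or.inr ⟨rfl, by omega⟩⟩] at v2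
        simp only []
        rw [e1, e2, v1, v2])
      _ hkoff
    obtain ⟨hloff, hlkey⟩ := hl
    intro a b
    by_cases hab : a = i ∧ b = j
    · obtain ⟨rfl, rfl⟩ := hab
      rw [if_pos ⟨hi1, hiw, hj1, hjh, Or.inr ⟨rfl, le_rfl⟩⟩]
      rw [hlkey, hkkey, hbase, ← pvVal_rec d0 a b hi1 hj1]
    · have hne : (a, b) ≠ (i, j) := by simp [Prod.ext_iff]; omega
      rw [hloff (a, b) hne]
      have := hx a b
      rw [this]
      have hiff : (1 ≤ a ∧ a ≤ w ∧ 1 ≤ b ∧ b ≤ h_ ∧ (a < i ∨ (a = i ∧ b ≤ j - 1))) ↔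
          (1 ≤ a ∧ a ≤ w ∧ 1 ≤ b ∧ b ≤ h_ ∧ (a < i ∨ (a = i ∧ b ≤ j))) := by omega
      rw [if_congr hiff rfl rfl]

lemma pvA_eq_val (w h_ : Int) (p : List (Int × Int × Int))
    (hw : 1 ≤ w) (hh : 1 ≤ h_) :
    sheet_cutting w h_ p = pvVal (pvDictP p) w h_ := by
  simp only [sheet_cutting]
  set d0 := pvDictP p with hd0
  have main := pvFoldInv (fun d i => pvInv w h_ d0 d i h_)
    (fun d i => (PySem.List.pyRange 1 (h_ + 1) 1).foldl
      (fun d j =>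
        if i = 1 ∧ j = 1 then d
        else
          (PySem.List.pyRange 1 (PySem.Int.floordiv j 2 + 1) 1).foldl
            (fun d l => d.insert (i, j)
              (max (d.getD (i, j) 0) (d.getD (i, l) 0 + d.getD (i, j - l) 0)))
            ((PySem.List.pyRange 1 (PySem.Int.floordiv i 2 + 1) 1).foldl
              (fun d k => d.insert (i, j)
                (max (d.getD (i, j) 0) (d.getD (k, j) 0 + d.getD (i - k, j) 0))) d))
      d)
    1 (w + 1) (by omega)
    (by
      intro x i hi1 hiw hxi
      have hinner := pvFoldInv (fun d j => pvInv w h_ d0 d i j)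
        (fun d j =>
          if i = 1 ∧ j = 1 then d
          else
            (PySem.List.pyRange 1 (PySem.Int.floordiv j 2 + 1) 1).foldl
              (fun d l => d.insert (i, j)
                (max (d.getD (i, j) 0) (d.getD (i, l) 0 + d.getD (i, j - l) 0)))
              ((PySem.List.pyRange 1 (PySem.Int.floordiv i 2 + 1) 1).foldl
                (fun d k => d.insert (i, j)
                  (max (d.getD (i, j) 0) (d.getD (k, j) 0 + d.getD (i - k, j) 0))) d))
        1 (h_ + 1) (by omega)
        (by
          intro y j hj1 hjh hyj
          exact pvCell w h_ d0 i j (by omega) (by omega) (by omega) (by omega) y hyj)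
        x
        (by
          -- pvInv x (i-1) h_ → pvInv x i (1-1)
          intro a b
          have := hxi a b
          rw [this]
          have hiff : (1 ≤ a ∧ a ≤ w ∧ 1 ≤ b ∧ b ≤ h_ ∧ (a < i - 1 ∨ (a = i - 1 ∧ b ≤ h_))) ↔
              (1 ≤ a ∧ a ≤ w ∧ 1 ≤ b ∧ b ≤ h_ ∧ (a < i ∨ (a = i ∧ b ≤ 1 - 1))) := by omega
          rw [if_congr hiff rfl rfl])
      -- conclusion index h_ + 1 - 1 = h_
      have he : h_ + 1 - 1 = h_ := by ring
      rw [he] at hinner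
      exact hinner)
    d0
    (by
      intro a b
      rw [if_neg (by omega)])
  have he : w + 1 - 1 = w := by ring
  rw [he] at main
  have := main w h_
  rw [if_pos ⟨hw, le_rfl, hh, le_rfl, Or.inr ⟨rfl, le_rfl⟩⟩] at this
  exact this

-- ---------- B side ----------

def pvGoodM (d0 m : PySem.Dict (Int × Int) Int) : Prop :=
  ∀ (a b : Int) (v : Int), m.get? (a, b) = some v → v = pvVal d0 a b

lemma pvBest_correct (d0 : PySem.Dict (Int × Int) Int) :
    ∀ (f : Nat) (i j : Int) (m : PySem.Dict (Int × Int) Int),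
      1 ≤ i → 1 ≤ j → i + j - 2 < (f : Int) → pvGoodM d0 m →
      (pvBest d0 f i j m).1 = pvVal d0 i j ∧ pvGoodM d0 (pvBest d0 f i j m).2 := by
  intro f
  induction f with
  | zero => intro i j m hi hj hf hm; exact absurd hf (by omega)
  | succ f ih =>
    intro i j m hi hj hf hm
    have hdi : PySem.Int.floordiv i 2 ≤ i - 1 := by
      rw [PySem.Int.floordiv_eq_ediv_of_pos (by omega)]; omega
    have hdj : PySem.Int.floordiv j 2 ≤ j - 1 := by
      rw [PySem.Int.floordiv_eq_ediv_of_pos (by omega)]; omega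
    cases hget : m.get? (i, j) with
    | some v =>
      simp only [pvBest, hget]
      exact ⟨hm i j v hget, hm⟩
    | none =>
      simp only [pvBest, hget]
      have hkfold : ∀ L : List Int, (∀ k ∈ L, 1 ≤ k ∧ k ≤ i - 1) →
          ∀ (v : Int) (m0 : PySem.Dict (Int × Int) Int), pvGoodM d0 m0 →
          (L.foldl (fun (s : Int × PySem.Dict (Int × Int) Int) k =>
              let r1 := pvBest d0 f k j s.2
              let r2 := pvBest d0 f (i - k) j r1.2
              (max s.1 (r1.1 + r2.1), r2.2)) (v, m0)).1
            = L.foldl (fun v k => max v (pvVal d0 k j + pvVal d0 (i - k) j)) v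
          ∧ pvGoodM d0
            ((L.foldl (fun (s : Int × PySem.Dict (Int × Int) Int) k =>
              let r1 := pvBest d0 f k j s.2
              let r2 := pvBest d0 f (i - k) j r1.2
              (max s.1 (r1.1 + r2.1), r2.2)) (v, m0)).2) := by
        intro L
        induction L with
        | nil => exact fun _ v m0 hm0 => ⟨rfl, hm0⟩
        | cons k L ihL =>
          intro hmem v m0 hm0
          obtain ⟨hk1, hk2⟩ := hmem k (List.mem_cons_self ..)
          have h1 := ih k j m0 (by omega) hj (by omega) hm0
          have h2 := ih (i - k) j (pvBest d0 f k j m0).2 (by omega) hj (by omega) h1.2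
          simp only [List.foldl_cons]
          rw [h1.1, h2.1]
          exact ihL (fun k hk => hmem k (List.mem_cons_of_mem _ hk)) _ _ h2.2
      have hlfold : ∀ L : List Int, (∀ l ∈ L, 1 ≤ l ∧ l ≤ j - 1) →
          ∀ (v : Int) (m0 : PySem.Dict (Int × Int) Int), pvGoodM d0 m0 →
          (L.foldl (fun (s : Int × PySem.Dict (Int × Int) Int) l =>
              let r1 := pvBest d0 f i l s.2
              let r2 := pvBest d0 f i (j - l) r1.2
              (max s.1 (r1.1 + r2.1), r2.2)) (v, m0)).1
            = L.foldl (fun v l => max v (pvVal d0 i l + pvVal d0 i (j - l))) v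
          ∧ pvGoodM d0
            ((L.foldl (fun (s : Int × PySem.Dict (Int × Int) Int) l =>
              let r1 := pvBest d0 f i l s.2
              let r2 := pvBest d0 f i (j - l) r1.2
              (max s.1 (r1.1 + r2.1), r2.2)) (v, m0)).2) := by
        intro L
        induction L with
        | nil => exact fun _ v m0 hm0 => ⟨rfl, hm0⟩
        | cons l L ihL =>
          intro hmem v m0 hm0
          obtain ⟨hl1, hl2⟩ := hmem l (List.mem_cons_self ..)
          have h1 := ih i l m0 hi (by omega) (by omega) hm0
          have h2 := ih i (j - l) (pvBest d0 f i l m0).2 hi (by omega) (by omega) h1.2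
          simp only [List.foldl_cons]
          rw [h1.1, h2.1]
          exact ihL (fun l hl => hmem l (List.mem_cons_of_mem _ hl)) _ _ h2.2
      have hkmem : ∀ k ∈ PySem.List.pyRange 1 (PySem.Int.floordiv i 2 + 1) 1,
          1 ≤ k ∧ k ≤ i - 1 := by
        intro k hk; rw [PySem.List.mem_pyRange_one] at hk; omega
      have hlmem : ∀ l ∈ PySem.List.pyRange 1 (PySem.Int.floordiv j 2 + 1) 1,
          1 ≤ l ∧ l ≤ j - 1 := by
        intro l hl; rw [PySem.List.mem_pyRange_one] at hl; omega
      have hs1 := hkfold _ hkmem (d0.getD (i, j) 0) m hm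
      have hs2 := hlfold (PySem.List.pyRange 1 (PySem.Int.floordiv j 2 + 1) 1) hlmem
        ((PySem.List.pyRange 1 (PySem.Int.floordiv i 2 + 1) 1).foldl (fun (s : Int × PySem.Dict (Int × Int) Int) k =>
              let r1 := pvBest d0 f k j s.2
              let r2 := pvBest d0 f (i - k) j r1.2
              (max s.1 (r1.1 + r2.1), r2.2)) (d0.getD (i, j) 0, m)).1 ((PySem.List.pyRange 1 (PySem.Int.floordiv i 2 + 1) 1).foldl (fun (s : Int × PySem.Dict (Int × Int) Int) k =>
              let r1 := pvBest d0 f k j s.2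
              let r2 := pvBest d0 f (i - k) j r1.2
              (max s.1 (r1.1 + r2.1), r2.2)) (d0.getD (i, j) 0, m)).2 hs1.2
      rw [Prod.mk.eta] at hs2
      have hval : ((PySem.List.pyRange 1 (PySem.Int.floordiv j 2 + 1) 1).foldl (fun (s : Int × PySem.Dict (Int × Int) Int) l =>
              let r1 := pvBest d0 f i l s.2
              let r2 := pvBest d0 f i (j - l) r1.2
              (max s.1 (r1.1 + r2.1), r2.2)) ((PySem.List.pyRange 1 (PySem.Int.floordiv i 2 + 1) 1).foldl (fun (s : Int × PySem.Dict (Int × Int) Int) k =>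
              let r1 := pvBest d0 f k j s.2
              let r2 := pvBest d0 f (i - k) j r1.2
              (max s.1 (r1.1 + r2.1), r2.2)) (d0.getD (i, j) 0, m))).1 = pvVal d0 i j := by
        rw [hs2.1, hs1.1, ← pvVal_rec d0 i j hi hj]
      refine ⟨hval, ?_⟩
      show pvGoodM d0 (((PySem.List.pyRange 1 (PySem.Int.floordiv j 2 + 1) 1).foldl (fun (s : Int × PySem.Dict (Int × Int) Int) l =>
              let r1 := pvBest d0 f i l s.2
              let r2 := pvBest d0 f i (j - l) r1.2
              (max s.1 (r1.1 + r2.1), r2.2)) ((PySem.List.pyRange 1 (PySem.Int.floordiv i 2 + 1) 1).foldl (fun (s : Int × PySem.Dict (Int × Int) Int) k =>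
              let r1 := pvBest d0 f k j s.2
              let r2 := pvBest d0 f (i - k) j r1.2
              (max s.1 (r1.1 + r2.1), r2.2)) (d0.getD (i, j) 0, m))).2.insert (i, j) ((PySem.List.pyRange 1 (PySem.Int.floordiv j 2 + 1) 1).foldl (fun (s : Int × PySem.Dict (Int × Int) Int) l =>
              let r1 := pvBest d0 f i l s.2
              let r2 := pvBest d0 f i (j - l) r1.2
              (max s.1 (r1.1 + r2.1), r2.2)) ((PySem.List.pyRange 1 (PySem.Int.floordiv i 2 + 1) 1).foldl (fun (s : Int × PySem.Dict (Int × Int) Int) k =>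
              let r1 := pvBest d0 f k j s.2
              let r2 := pvBest d0 f (i - k) j r1.2
              (max s.1 (r1.1 + r2.1), r2.2)) (d0.getD (i, j) 0, m))).1)
      intro a b v hv
      rw [PySem.Dict.get?_insert] at hv
      by_cases hab : ((a, b) : Int × Int) = (i, j)
      · rw [if_pos hab] at hv
        have hv' : v = ((PySem.List.pyRange 1 (PySem.Int.floordiv j 2 + 1) 1).foldl (fun (s : Int × PySem.Dict (Int × Int) Int) l =>
              let r1 := pvBest d0 f i l s.2
              let r2 := pvBest d0 f i (j - l) r1.2
              (max s.1 (r1.1 + r2.1), r2.2)) ((PySem.List.pyRange 1 (PySem.Int.floordiv i 2 + 1) 1).foldl (fun (s : Int × PySem.Dict (Int × Int) Int) k =>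
              let r1 := pvBest d0 f k j s.2
              let r2 := pvBest d0 f (i - k) j r1.2
              (max s.1 (r1.1 + r2.1), r2.2)) (d0.getD (i, j) 0, m))).1 := (Option.some.inj hv).symm
        obtain ⟨rfl, rfl⟩ : a = i ∧ b = j :=
          ⟨congrArg Prod.fst hab, congrArg Prod.snd hab⟩
        rw [hv', hval]
      · rw [if_neg hab] at hv
        exact hs2.2 a b v hv

lemma pvB_eq_val (w h_ : Int) (p : List (Int × Int × Int))
    (hw : 1 ≤ w) (hh : 1 ≤ h_) :
    sheet_cutting_alt w h_ p = pvVal (pvDictP p) w h_ := by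
  rw [sheet_cutting_alt, if_neg (by omega)]
  have hgood : pvGoodM (pvDictP p) PySem.Dict.empty := by
    intro a b v hv
    rw [PySem.Dict.get?_empty] at hv
    exact absurd hv (by simp)
  have := pvBest_correct (pvDictP p) ((w + h_).toNat + 1) w h_ PySem.Dict.empty hw hh
    (by omega) hgood
  exact this.1

lemma pvA_degenerate (w h_ : Int) (p : List (Int × Int × Int))
    (hdeg : w < 1 ∨ h_ < 1) :
    sheet_cutting w h_ p = (pvDictP p).getD (w, h_) 0 := by
  simp only [sheet_cutting]
  rcases hdeg with hw | hh
  · rw [PySem.List.pyRange_one_eq_nil (by omega : w + 1 ≤ 1), List.foldl_nil]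
  · rw [PySem.List.foldl_congr_mem (PySem.List.pyRange 1 (w + 1) 1)
      (fun (d : PySem.Dict (Int × Int) Int) (i : Int) =>
        (PySem.List.pyRange 1 (h_ + 1) 1).foldl
          (fun d j =>
            if i = 1 ∧ j = 1 then d
            else
              (PySem.List.pyRange 1 (PySem.Int.floordiv j 2 + 1) 1).foldl
                (fun d l => d.insert (i, j)
                  (max (d.getD (i, j) 0) (d.getD (i, l) 0 + d.getD (i, j - l) 0)))
                ((PySem.List.pyRange 1 (PySem.Int.floordiv i 2 + 1) 1).foldl
                  (fun d k => d.insert (i, j)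
                    (max (d.getD (i, j) 0) (d.getD (k, j) 0 + d.getD (i - k, j) 0))) d))
          d)
      (fun d _ => d) (pvDictP p)
      (by
        intro acc i _
        rw [PySem.List.pyRange_one_eq_nil (by omega : h_ + 1 ≤ 1)]
        rfl),
      PySem.List.foldl_ignore]

-- ===== VERDICT (by name: the statement is the Claim_ definition above) =====
theorem sheet_cutting_spec : Claim_equal_sheet_cutting := by
  intro w h_ p _ hpre
  unfold Spec_sheet_cutting
  by_cases hdeg : 1 ≤ w ∧ 1 ≤ h_
  · rw [pvA_eq_val w h_ p hdeg.1 hdeg.2, pvB_eq_val w h_ p hdeg.1 hdeg.2]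
  · rw [pvA_degenerate w h_ p (by omega), sheet_cutting_alt, if_pos (by omega)]
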